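-- pv_equiv track=rewrite | github.com/danrsc/bert_brain | bert_erp_datasets/preprocessors.py | pair_from_end
-- ===== SOURCE A (Python) =====
-- def pair_from_end(data_ids1, data_ids2):
--     skip = len(data_ids2) - (len(data_ids1) - 1)
--     skip1, skip2 = 0, 0
--     if skip < 0:  # seq 2 is shorter, skip some of seq 1
--         start = len(data_ids1)
--         skip1 = -skip
--     else:
--         start = len(data_ids1) + skip
--         skip2 = skip
--     return [(data_ids1[i - start + 1 + skip1], data_ids2[i - start + skip2])
--             if start <= i else None for i in range(len(data_ids1) + len(data_ids2))]
-- ===== SOURCE B (Python) =====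
-- def pair_from_end(data_ids1, data_ids2):
--     n1, n2 = len(data_ids1), len(data_ids2)
--     if n2 < n1 - 1:  # seq 2 shorter: pad n1 Nones, pair the tail of seq 1 with all of seq 2
--         return [None] * n1 + list(zip(data_ids1[n1 - n2:], data_ids2))
--     # otherwise pad n2 + 1 Nones (capped at total length) and pair seq1[1:] with the tail of seq 2
--     return [None] * min(n2 + 1, n1 + n2) + list(zip(data_ids1[1:], data_ids2[n2 - n1 + 1:]))
-- ===== Notes on version B (the rewrite author's own statement) =====
-- stated objective: simpler
-- what changed: Replaces the index-arithmetic comprehension over range(n1+n2) with a padding-plus-zip decomposition: a capped run of Nones concatenated with zip of two end-aligned slices.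
import Mathlib
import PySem

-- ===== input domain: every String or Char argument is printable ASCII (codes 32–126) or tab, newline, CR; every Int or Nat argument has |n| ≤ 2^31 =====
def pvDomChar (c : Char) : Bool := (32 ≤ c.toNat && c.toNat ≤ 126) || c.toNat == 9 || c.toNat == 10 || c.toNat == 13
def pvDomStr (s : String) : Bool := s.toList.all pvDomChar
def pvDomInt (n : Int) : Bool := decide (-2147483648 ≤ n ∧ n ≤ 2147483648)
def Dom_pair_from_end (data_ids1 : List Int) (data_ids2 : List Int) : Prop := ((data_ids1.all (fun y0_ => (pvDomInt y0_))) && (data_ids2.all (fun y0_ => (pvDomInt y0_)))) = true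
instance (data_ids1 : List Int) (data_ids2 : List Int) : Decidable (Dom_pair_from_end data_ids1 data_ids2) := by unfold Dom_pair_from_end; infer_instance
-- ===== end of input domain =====

-- B builds the padding-plus-zip decomposition ([None]*k ++ zip of end-aligned slices) instead of A's index-arithmetic comprehension; objective: simpler.


-- ===== PORT A =====
def pair_from_end (data_ids1 : List Int) (data_ids2 : List Int) : List (Option (Int × Int)) :=
  let skip : Int := (data_ids2.length : Int) - ((data_ids1.length : Int) - 1)
  let start : Int := if skip < 0 then (data_ids1.length : Int) else (data_ids1.length : Int) + skip
  let skip1 : Int := if skip < 0 then -skip else 0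
  let skip2 : Int := if skip < 0 then 0 else skip
  (PySem.List.pyRange 0 ((data_ids1.length : Int) + (data_ids2.length : Int)) 1).map
    (fun i =>
      if start ≤ i then
        -- both indices are always in range in the Python; 'none' here is unreachable
        match PySem.List.pyGet? data_ids1 (i - start + 1 + skip1),
              PySem.List.pyGet? data_ids2 (i - start + skip2) with
        | some a, some b => some (a, b)
        | _, _ => none
      else none)

-- ===== PORT B =====
def pair_from_end_alt (data_ids1 : List Int) (data_ids2 : List Int) : List (Option (Int × Int)) :=
  let n1 : Int := data_ids1.length
  let n2 : Int := data_ids2.length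
  if n2 < n1 - 1 then
    List.replicate data_ids1.length none ++
      ((data_ids1.drop (n1 - n2).toNat).zip data_ids2).map some
  else
    List.replicate (min (n2 + 1) (n1 + n2)).toNat none ++
      ((data_ids1.drop 1).zip (data_ids2.drop (n2 - n1 + 1).toNat)).map some

-- ===== PRECONDITION & SPEC =====
def Spec_pair_from_end (data_ids1 : List Int) (data_ids2 : List Int) (out : List (Option (Int × Int))) : Prop := out = pair_from_end_alt data_ids1 data_ids2
instance (data_ids1 : List Int) (data_ids2 : List Int) (out : List (Option (Int × Int))) : Decidable (Spec_pair_from_end data_ids1 data_ids2 out) := by unfold Spec_pair_from_end; infer_instance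

-- ===== CLAIM (what is proved, stated in full; the proofs are below) =====
def Claim_equal_pair_from_end : Prop := ∀ (data_ids1 : List Int) (data_ids2 : List Int), Dom_pair_from_end data_ids1 data_ids2 → Spec_pair_from_end data_ids1 data_ids2 (pair_from_end data_ids1 data_ids2)

-- ===== LEMMAS AND PROOFS =====

theorem ports_eq (d1 d2 : List Int) : pair_from_end d1 d2 = pair_from_end_alt d1 d2 := by
  simp only [pair_from_end, pair_from_end_alt]
  by_cases hc : ((d2.length : Int) - ((d1.length : Int) - 1)) < 0
  · rw [if_pos hc, if_pos hc, if_pos hc, if_pos (by omega : (d2.length : Int) < (d1.length : Int) - 1)]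
    rw [PySem.List.pyRange_one, List.map_map]
    apply List.ext_getElem
    · simp [List.length_zip]
      omega
    · intro i h1 h2
      simp only [List.length_map, List.length_range] at h1
      simp only [List.getElem_map, List.getElem_range, Function.comp_apply]
      by_cases hi : i < d1.length
      · rw [List.getElem_append_left (by simpa using hi)]
        rw [List.getElem_replicate]
        rw [if_neg (by omega)]
      · rw [List.getElem_append_right (by simpa using hi)]
        rw [if_pos (by omega)]
        rw [PySem.List.pyGet?_eq_some_getElem d1 (by omega) (by omega)]
        rw [PySem.List.pyGet?_eq_some_getElem d2 (by omega) (by omega)]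
        simp only [List.getElem_map, List.getElem_zip, List.getElem_drop, List.length_replicate]
        have e1 : (↑i - (d1.length:Int) + 1 + ((d1.length:Int) - 1 - ↑d2.length)).toNat
            = d1.length - d2.length + (i - d1.length) := by omega
        simp [e1]
  · rw [if_neg hc, if_neg hc, if_neg hc, if_neg (by omega : ¬ (d2.length : Int) < (d1.length : Int) - 1)]
    rw [PySem.List.pyRange_one, List.map_map]
    apply List.ext_getElem
    · simp [List.length_zip]
      omega
    · intro i h1 h2
      simp only [List.length_map, List.length_range] at h1
      simp only [List.getElem_map, List.getElem_range, Function.comp_apply]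
      by_cases hi : i < (min ((d2.length:Int) + 1) ((d1.length:Int) + (d2.length:Int))).toNat
      · rw [List.getElem_append_left (by simp only [List.length_replicate]; omega)]
        rw [List.getElem_replicate]
        rw [if_neg (by omega)]
      · rw [List.getElem_append_right (by simp only [List.length_replicate]; omega)]
        rw [if_pos (by omega)]
        rw [PySem.List.pyGet?_eq_some_getElem d1 (by omega) (by omega)]
        rw [PySem.List.pyGet?_eq_some_getElem d2 (by omega) (by omega)]
        simp only [List.getElem_map, List.getElem_zip, List.getElem_drop, List.length_replicate]
        have e1 : (↑i - ((d1.length:Int) + ((d2.length:Int) - ((d1.length:Int) - 1))) + 1).toNat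
            = 1 + (i - (min ((d2.length:Int) + 1) ((d1.length:Int) + (d2.length:Int))).toNat) := by omega
        have e2 : (↑i - ((d1.length:Int) + ((d2.length:Int) - ((d1.length:Int) - 1))) + ((d2.length:Int) - ((d1.length:Int) - 1))).toNat
            = ((d2.length:Int) - (d1.length:Int) + 1).toNat + (i - (min ((d2.length:Int) + 1) ((d1.length:Int) + (d2.length:Int))).toNat) := by omega
        simp [e1, e2]

-- ===== VERDICT (by name: the statement is the Claim_ definition above) =====
theorem pair_from_end_spec : Claim_equal_pair_from_end := by
  intro d1 d2 _
  unfold Spec_pair_from_end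
  exact ports_eq d1 d2
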